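-- pv_equiv track=rewrite | github.com/JtJint/alom-codingTest-25-1 | week2/dynamic_programming/문제풀이/백준2629.py | dynamicP1
-- ===== SOURCE A (Python) =====
-- def combination(n, tmpMap, total, dp,idx) :
--     if n == 0 or idx >= len(tmpMap) :
--         dp[total] += 1
--         return total
--
--     tmp = {}
--     idxlist = []
--     for i in tmpMap :
--         tmp[i] = tmpMap[i]
--         idxlist.append(i)
--     for i in range(idx, len(tmp)) :
--         if tmp[idxlist[i]] > 0 :
--             tmp[idxlist[i]]-=1
--             combination(n-1,tmp, total+idxlist[i],dp, i)
--
-- def dynamicP1(object, tmpMap, totalCnt) :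
--
--     tmpMap[object] = 1
--     if object == 10 :
--         a= 0
--     n = 0
--     #콘티 1 . object와 알고있는 것 (tmpMap)의 갯수 제한을 통한 조합으로 두개 이상의 조합이 나온다면
--     #이는 내가 이녀석의 무게를 알 수 있다는 것을 방증
--     for i in tmpMap :
--         n += tmpMap[i]
--     q= 0
--
--     for i in tmpMap :
--         q+= i*tmpMap[i]
--     dp = [0]*(q+1)
--     dp[0] = 1
--     # 전체 갯수 파악 완료한 상태 이중에서 몇개만 뽑을지를 골라야함 ㅇㅈ? 그렇다면 1~n까지 조합을 짜야함.
--     cnt = 1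
--     while cnt <= n :
--         combination(cnt,tmpMap,0,dp,0)
--         cnt+=1
--
--     if 2 in dp :
--         return True
--
--
--
--     return False
-- ===== SOURCE B (Python) =====
-- def dynamicP1(object, tmpMap, totalCnt):
--     # Bounded-knapsack counting DP over the item types (weight -> count),
--     # instead of A's exponential enumeration of all sub-multisets.
--     # Like A, mutates tmpMap in place (tmpMap[object] = 1).
--     tmpMap[object] = 1
--     q = 0
--     for w, c in tmpMap.items():
--         q += w * c
--     dp = [0] * (q + 1)
--     dp[0] = 1
--     for w, c in tmpMap.items():
--         new = []
--         for t in range(q + 1):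
--             s = 0
--             for j in range(c + 1):
--                 r = t - j * w
--                 if 0 <= r <= q:
--                     s += dp[r]
--             new.append(s)
--         dp = new
--     return 2 in dp
-- ===== Notes on version B (the rewrite author's own statement) =====
-- stated objective: faster
-- what changed: Replaces A's recursive enumeration of every sub-multiset (one DFS per size 1..n, copying the dict at each node) by a bounded-knapsack counting DP over the item types: dp[t] = number of sub-multisets summing to t, built in one pass over the (weight,count) pairs, then '2 in dp' as in A.
-- outside the precondition, e.g. on dynamicP1(4, {0: -2, 2: 3}, 0): A returns True, B returns False; on dynamicP1(1, {0: -1}, 0): A returns False, B returns False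
import Mathlib
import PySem

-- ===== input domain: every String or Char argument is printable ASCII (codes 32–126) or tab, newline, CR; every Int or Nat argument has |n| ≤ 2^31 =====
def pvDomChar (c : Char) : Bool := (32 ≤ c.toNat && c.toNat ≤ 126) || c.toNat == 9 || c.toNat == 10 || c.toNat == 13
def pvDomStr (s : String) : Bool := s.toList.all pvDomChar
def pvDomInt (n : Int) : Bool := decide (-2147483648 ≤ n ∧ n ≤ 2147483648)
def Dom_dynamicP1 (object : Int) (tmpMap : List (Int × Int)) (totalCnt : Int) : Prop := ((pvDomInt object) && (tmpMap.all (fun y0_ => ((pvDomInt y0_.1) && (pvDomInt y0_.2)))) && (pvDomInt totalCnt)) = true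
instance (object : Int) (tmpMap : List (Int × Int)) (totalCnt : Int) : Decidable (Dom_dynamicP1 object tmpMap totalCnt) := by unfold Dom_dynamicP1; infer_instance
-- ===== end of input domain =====

-- B replaces A's exponential sub-multiset enumeration by a bounded-knapsack counting DP
-- (objective: faster). Both Pythons mutate tmpMap in place (tmpMap[object] = 1); the
-- equivalence proved here is about the return value.

-- ===== PORT A =====
-- fuel is A's own `n` (top calls pass n.toNat and each recursive call passes n-1,
-- so fuel = n.toNat throughout; the fuel-0 fallback is unreachable).
def combination : Nat → Int → PySem.Dict Int Int → Int → List Int → Int → List Int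
  | fuel, n, tmpMap, total, dp, idx =>
    if n = 0 ∨ idx ≥ (tmpMap.size : Int) then
      -- dp[total] += 1 (Python indexing; in range under Pre_)
      PySem.List.pySetD dp total (PySem.List.pyGetD dp total 0 + 1)
    else
      match fuel with
      | 0 => dp  -- unreachable (fuel = n.toNat ≥ 1 whenever this branch is reached)
      | fuel' + 1 =>
        -- tmp = {}; idxlist = []; for i in tmpMap: tmp[i] = tmpMap[i]; idxlist.append(i)
        let st0 := tmpMap.keys.foldl
          (fun (st : PySem.Dict Int Int × List Int) i =>
            (st.1.insert i (tmpMap.getD i 0), st.2 ++ [i]))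
          (PySem.Dict.empty, [])
        -- for i in range(idx, len(tmp)): if tmp[idxlist[i]] > 0: decrement; recurse
        ((PySem.List.pyRange idx (st0.1.size : Int) 1).foldl
          (fun (st : PySem.Dict Int Int × List Int) i =>
            let key := PySem.List.pyGetD st0.2 i 0
            if st.1.getD key 0 > 0 then
              let tmp' := st.1.insert key (st.1.getD key 0 - 1)
              (tmp', combination fuel' (n - 1) tmp' (total + key) st.2 i)
            else st)
          (st0.1, dp)).2

def dynamicP1 (object : Int) (tmpMap : List (Int × Int)) (totalCnt : Int) : Bool :=
  let d := (PySem.Dict.ofList tmpMap).insert object 1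
  let n := d.keys.foldl (fun a i => a + d.getD i 0) 0
  let q := d.keys.foldl (fun a i => a + i * d.getD i 0) 0
  -- dp = [0]*(q+1); dp[0] = 1  (raises when q < 0: excluded by Pre_)
  let dp0 : List Int := PySem.List.pySetD (List.replicate (q + 1).toNat 0) 0 1
  -- cnt = 1; while cnt <= n: combination(cnt, tmpMap, 0, dp, 0); cnt += 1
  let dp := (PySem.List.pyRange 1 (n + 1) 1).foldl
    (fun dp cnt => combination cnt.toNat cnt d 0 dp 0) dp0
  decide ((2 : Int) ∈ dp)

-- ===== PORT B =====
def dynamicP1_alt (object : Int) (tmpMap : List (Int × Int)) (totalCnt : Int) : Bool :=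
  let d := (PySem.Dict.ofList tmpMap).insert object 1
  let q := d.items.foldl (fun a p => a + p.1 * p.2) 0
  let dp0 : List Int := PySem.List.pySetD (List.replicate (q + 1).toNat 0) 0 1
  let dp := d.items.foldl
    (fun dp p =>
      (PySem.List.pyRange 0 (q + 1) 1).map (fun t =>
        (PySem.List.pyRange 0 (p.2 + 1) 1).foldl (fun s j =>
          let r := t - j * p.1
          if 0 ≤ r ∧ r ≤ q then s + PySem.List.pyGetD dp r 0 else s) 0))
    dp0
  decide ((2 : Int) ∈ dp)

-- ===== PRECONDITION & SPEC =====
-- Pre_ excludes negative object, keys and counts: there A normally raises IndexError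
-- (dp of negative size, or a sub-multiset sum outside dp's range), and where it happens
-- to return, the value went through Python's negative-index wraparound on dp.
def Pre_dynamicP1 (object : Int) (tmpMap : List (Int × Int)) (totalCnt : Int) : Prop :=
  0 ≤ object ∧ ∀ p ∈ tmpMap, 0 ≤ p.1 ∧ 0 ≤ p.2
instance (object : Int) (tmpMap : List (Int × Int)) (totalCnt : Int) : Decidable (Pre_dynamicP1 object tmpMap totalCnt) := by unfold Pre_dynamicP1; infer_instance

def pvWitness_dynamicP1 : Int × (List (Int × Int)) × Int := (3, [(1, 2)], 0)

def Spec_dynamicP1 (object : Int) (tmpMap : List (Int × Int)) (totalCnt : Int) (out : Bool) : Prop := out = dynamicP1_alt object tmpMap totalCnt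
instance (object : Int) (tmpMap : List (Int × Int)) (totalCnt : Int) (out : Bool) : Decidable (Spec_dynamicP1 object tmpMap totalCnt out) := by unfold Spec_dynamicP1; infer_instance

-- ===== CLAIM (what is proved, stated in full; the proofs are below) =====
def Claim_equal_dynamicP1 : Prop := ∀ (object : Int) (tmpMap : List (Int × Int)) (totalCnt : Int), Dom_dynamicP1 object tmpMap totalCnt → Pre_dynamicP1 object tmpMap totalCnt → Spec_dynamicP1 object tmpMap totalCnt (dynamicP1 object tmpMap totalCnt)

-- ===== LEMMAS AND PROOFS =====

def pvDelta (s : Int) : Int := if s = 0 then 1 else 0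

def pvStep (w c : Int) (f : Int → Int) : Int → Int :=
  fun t => ((List.range (c.toNat + 1)).map (fun (j : Nat) => f (t - (j : Int) * w))).sum

def pvC : List (Int × Int) → Int → Int
  | [] => pvDelta
  | p :: rest => pvStep p.1 p.2 (pvC rest)

def pvW : Nat → List (Int × Int) → Int → Int
  | 0, _, s => pvDelta s
  | _ + 1, [], _ => 0
  | n + 1, (w, c) :: rest, s =>
      (if 0 < c then pvW n ((w, c - 1) :: rest) (s - w) else 0) + pvW (n + 1) rest s
termination_by n l _ => (n, l.length)

def pvSum (L : List (Int × Int)) : Int := (L.map (fun p => p.1 * p.2)).sum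

def pvCnt (L : List (Int × Int)) : Int := (L.map (fun p => p.2)).sum

lemma pvSumRange (n : Nat) (f : Nat → Int) : ((List.range n).map f).sum = ∑ i ∈ Finset.range n, f i := by
  induction n with
  | zero => simp
  | succ k ih => rw [List.range_succ, Finset.sum_range_succ, ← ih]; simp

lemma pvStep_comm (w c w' c' : Int) (f : Int → Int) :
    pvStep w c (pvStep w' c' f) = pvStep w' c' (pvStep w c f) := by
  funext t
  unfold pvStep
  rw [pvSumRange, pvSumRange]
  simp only [pvSumRange]
  rw [Finset.sum_comm]
  apply Finset.sum_congr rfl; intro k _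
  apply Finset.sum_congr rfl; intro j _
  congr 1; ring

lemma pvC_append_singleton (L : List (Int × Int)) (p : Int × Int) :
    pvC (L ++ [p]) = pvStep p.1 p.2 (pvC L) := by
  induction L with
  | nil => rfl
  | cons x L ih =>
    show pvStep x.1 x.2 (pvC (L ++ [p])) = pvStep p.1 p.2 (pvStep x.1 x.2 (pvC L))
    rw [ih, pvStep_comm]

lemma pvSum_nonneg (L : List (Int × Int)) (h : ∀ p ∈ L, 0 ≤ p.1 ∧ 0 ≤ p.2) : 0 ≤ pvSum L := by
  apply List.sum_nonneg
  intro x hx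
  simp only [List.mem_map] at hx
  obtain ⟨p, hp, rfl⟩ := hx
  exact mul_nonneg (h p hp).1 (h p hp).2

lemma pvCnt_nonneg (L : List (Int × Int)) (h : ∀ p ∈ L, 0 ≤ p.2) : 0 ≤ pvCnt L := by
  apply List.sum_nonneg
  intro x hx
  simp only [List.mem_map] at hx
  obtain ⟨p, hp, rfl⟩ := hx
  exact h p hp

lemma pvC_out (L : List (Int × Int)) (s : Int) (h : ∀ p ∈ L, 0 ≤ p.1 ∧ 0 ≤ p.2)
    (hs : s < 0 ∨ pvSum L < s) : pvC L s = 0 := by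
  induction L generalizing s with
  | nil =>
    have : s ≠ 0 := by
      rcases hs with h1 | h1
      · omega
      · simp [pvSum] at h1; omega
    simp [pvC, pvDelta, this]
  | cons p rest ih =>
    obtain ⟨w, c⟩ := p
    have hw : 0 ≤ w := (h (w, c) (by simp)).1
    have hc : 0 ≤ c := (h (w, c) (by simp)).2
    have hrest : ∀ p ∈ rest, 0 ≤ p.1 ∧ 0 ≤ p.2 := fun p hp => h p (by simp [hp])
    show pvStep w c (pvC rest) s = 0
    unfold pvStep
    apply List.sum_eq_zero
    intro x hx
    simp only [List.mem_map, List.mem_range] at hx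
    obtain ⟨j, hj, rfl⟩ := hx
    apply ih _ hrest
    have hjc : (j : Int) ≤ c := by omega
    rcases hs with h1 | h1
    · left; have : 0 ≤ (j : Int) * w := mul_nonneg (by positivity) hw; omega
    · right
      have h2 : pvSum ((w, c) :: rest) = w * c + pvSum rest := by simp [pvSum]
      have : (j : Int) * w ≤ c * w := by
        apply mul_le_mul_of_nonneg_right hjc hw
      nlinarith [h1, h2]

lemma pvW_succ_nil (k : Nat) (s : Int) : pvW (k + 1) [] s = 0 := by rw [pvW]

lemma pvW_succ_cons (k : Nat) (w c : Int) (rest : List (Int × Int)) (s : Int) :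
    pvW (k + 1) ((w, c) :: rest) s
      = (if 0 < c then pvW k ((w, c - 1) :: rest) (s - w) else 0) + pvW (k + 1) rest s := by
  rw [pvW]

lemma pvW_zero_eq (L : List (Int × Int)) (s : Int) : pvW 0 L s = pvDelta s := by simp [pvW]

lemma pvC_cons_zero (w : Int) (c : Int) (hc : c ≤ 0) (rest : List (Int × Int)) (s : Int) :
    pvC ((w, c) :: rest) s = pvC rest s := by
  have : c.toNat = 0 := by omega
  show pvStep w c (pvC rest) s = pvC rest s
  unfold pvStep
  simp [this]

lemma pvC_cons_succ (w c : Int) (hc : 0 < c) (rest : List (Int × Int)) (s : Int) :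
    pvC ((w, c) :: rest) s = pvC rest s + pvC ((w, c - 1) :: rest) (s - w) := by
  show pvStep w c (pvC rest) s = pvC rest s + pvStep w (c - 1) (pvC rest) (s - w)
  unfold pvStep
  have h1 : c.toNat = (c - 1).toNat + 1 := by omega
  rw [h1, List.range_succ_eq_map]
  simp only [List.map_cons, List.map_map, List.sum_cons]
  congr 1
  · simp
  · congr 1
    apply List.map_congr_left
    intro a _
    simp only [Function.comp]
    congr 1
    push_cast
    ring

lemma sum_map_range_succ (N : Nat) (g : Nat → Int) :
    ((List.range (N + 1)).map g).sum = g 0 + ((List.range N).map (fun n => g (n + 1))).sum := by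
  rw [List.range_succ_eq_map]
  simp [List.map_map, Function.comp_def, Nat.succ_eq_add_one]

lemma pvRangeSum : ∀ (meas : Nat) (L : List (Int × Int)) (N : Nat) (s : Int),
    L.length + (pvCnt L).toNat ≤ meas → (∀ p ∈ L, 0 ≤ p.2) → pvCnt L < (N : Int) →
    ((List.range N).map (fun n => pvW n L s)).sum = pvC L s := by
  intro meas
  induction meas using Nat.strong_induction_on with
  | _ meas ih =>
    intro L N s hm h hN
    have hcnt0 : 0 ≤ pvCnt L := pvCnt_nonneg L h
    obtain ⟨N', rfl⟩ : ∃ N', N = N' + 1 := by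
      cases N with
      | zero => exact absurd hN (by push_cast; omega)
      | succ N' => exact ⟨N', rfl⟩
    rw [sum_map_range_succ]
    have h00 : pvW 0 L s = pvDelta s := by simp [pvW]
    rw [h00]
    cases L with
    | nil =>
      have : ∀ n ∈ List.range N', pvW (n + 1) ([] : List (Int × Int)) s = 0 :=
        fun n _ => pvW_succ_nil n s
      rw [List.map_congr_left this]
      simp [pvC]
    | cons p rest =>
      obtain ⟨w, c⟩ := p
      have hc : 0 ≤ c := h (w, c) (by simp)
      have hrest : ∀ p ∈ rest, 0 ≤ p.2 := fun p hp => h p (by simp [hp])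
      have hcr : 0 ≤ pvCnt rest := pvCnt_nonneg rest hrest
      have hcnt : pvCnt ((w, c) :: rest) = c + pvCnt rest := by simp [pvCnt]
      have hlen : ((w, c) :: rest).length = rest.length + 1 := by simp
      simp only [pvW_succ_cons]
      rw [PySem.List.sum_map_add_int]
      have hB : ((List.range N').map (fun n => pvW (n + 1) rest s)).sum
          = pvC rest s - pvDelta s := by
        have hm2 : rest.length + (pvCnt rest).toNat ≤ meas - 1 := by omega
        have hmeas : meas - 1 < meas := by omega
        have := ih (meas - 1) hmeas rest (N' + 1) s hm2 hrest (by push_cast; omega)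
        rw [sum_map_range_succ] at this
        have h0 : pvW 0 rest s = pvDelta s := by simp [pvW]
        rw [h0] at this
        omega
      by_cases hcpos : 0 < c
      · have hA : ((List.range N').map (fun n => pvW n ((w, c - 1) :: rest) (s - w))).sum
            = pvC ((w, c - 1) :: rest) (s - w) := by
          have hcnt' : pvCnt ((w, c - 1) :: rest) = c - 1 + pvCnt rest := by simp [pvCnt]
          have hm2 : ((w, c - 1) :: rest).length + (pvCnt ((w, c - 1) :: rest)).toNat ≤ meas - 1 := by
            simp only [List.length_cons]; omega
          have h' : ∀ p ∈ (w, c - 1) :: rest, 0 ≤ p.2 := by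
            intro p hp
            rcases List.mem_cons.mp hp with rfl | hp'
            · simp; omega
            · exact hrest p hp'
          exact ih (meas - 1) (by omega) _ N' (s - w) hm2 h' (by omega)
        simp only [if_pos hcpos]
        rw [hA, hB, pvC_cons_succ w c hcpos rest s]
        ring
      · simp only [if_neg hcpos]
        rw [hB, pvC_cons_zero w c (by omega) rest s]
        simp

lemma pvCopyPair (F : Int → Int) (l : List Int) (d : PySem.Dict Int Int) (acc : List Int) :
    l.foldl (fun st i => (st.1.insert i (F i), st.2 ++ [i])) (d, acc)
      = (l.foldl (fun d' i => d'.insert i (F i)) d, acc ++ l) := by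
  induction l generalizing d acc with
  | nil => simp
  | cons x l ih => simp only [List.foldl_cons]; rw [ih]; simp

lemma pvGetDSet (xs : List Int) (n m : Nat) (v : Int) (h : n < xs.length) :
    (xs.set n v).getD m 0 = if m = n then v else xs.getD m 0 := by
  by_cases hm : m < xs.length
  · rw [List.getD_eq_getElem _ _ (by simpa using hm), List.getD_eq_getElem _ _ hm,
      List.getElem_set]
    by_cases hmn : m = n
    · simp [hmn]
    · simp [hmn, show ¬ n = m from fun hh => hmn hh.symm]
  · have h1 : (xs.set n v).length ≤ m := by simpa using Nat.le_of_not_lt hm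
    rw [List.getD_eq_default _ _ h1, List.getD_eq_default _ _ (Nat.le_of_not_lt hm)]
    have : m ≠ n := by omega
    simp [this]

lemma pvDropSet {α : Type} (l : List α) (j : Nat) (x : α) :
    (l.set j x).drop (j + 1) = l.drop (j + 1) := by
  apply List.ext_getElem
  · simp
  · intro i h1 h2
    simp only [List.getElem_drop, List.getElem_set]
    have : ¬ (j = j + 1 + i) := by omega
    simp [this]

lemma pvDropSetCons {α : Type} (l : List α) (j : Nat) (x : α) (h : j < l.length) :
    (l.set j x).drop j = x :: l.drop (j + 1) := by
  rw [List.drop_eq_getElem_cons (by simpa using h), List.getElem_set]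
  simp [pvDropSet]

lemma pvSumSet (l : List (Int × Int)) (j : Nat) (x : Int × Int) (h : j < l.length) :
    pvSum (l.set j x) = pvSum l - l[j].1 * l[j].2 + x.1 * x.2 := by
  unfold pvSum
  rw [List.map_set, List.sum_set']
  simp [h]
  ring

lemma pvItemsInsertSet (items : List (Int × Int)) (j : Nat) (hj : j < items.length)
    (hnd : (items.map (·.1)).Nodup) (v : Int) :
    (items.map (fun p => if (p.1 == items[j].1) = true then (items[j].1, v) else p))
      = items.set j (items[j].1, v) := by
  apply List.ext_getElem
  · simp
  · intro i h1 h2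
    simp only [List.getElem_map, List.getElem_set]
    by_cases hij : i = j
    · subst hij; simp
    · have hi : i < items.length := by simpa using h1
      have hne : (items[i]'hi).1 ≠ items[j].1 := by
        intro he
        have h3 : (items.map (·.1))[i]'(by simpa using hi) = (items.map (·.1))[j]'(by simpa using hj) := by
          simpa using he
        exact hij ((List.Nodup.getElem_inj_iff hnd).mp h3)
      simp only [beq_iff_eq, if_neg hne, if_neg (show ¬ j = i from fun hh => hij hh.symm)]

lemma pvSum_append (a b : List (Int × Int)) : pvSum (a ++ b) = pvSum a + pvSum b := by
  simp [pvSum]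

lemma pvMemFoldInsert : ∀ (l : List (Int × Int)) (d0 : PySem.Dict Int Int) (p : Int × Int),
    p ∈ (l.foldl (fun d q => d.insert q.1 q.2) d0).items → p ∈ l ∨ p ∈ d0.items := by
  intro l
  induction l with
  | nil => intro d0 p hp; exact Or.inr hp
  | cons x l ih =>
    intro d0 p hp
    rw [List.foldl_cons] at hp
    rcases ih _ p hp with h1 | h1
    · exact Or.inl (by simp [h1])
    · rcases (PySem.Dict.mem_items_insert _ _ _ _).mp h1 with h2 | h2
      · left; simp [h2]
      · exact Or.inr h2.1

lemma combination_spec : ∀ (n : Nat) (tmp : PySem.Dict Int Int) (total : Int) (dp : List Int)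
    (idx q : Int),
    tmp.keys.Nodup →
    (∀ p ∈ tmp.items, 0 ≤ p.1 ∧ 0 ≤ p.2) →
    0 ≤ idx → idx < (tmp.size : Int) →
    0 ≤ total → total + pvSum tmp.items ≤ q →
    dp.length = (q + 1).toNat →
    (combination n (n : Int) tmp total dp idx).length = dp.length ∧
    ∀ m : Nat, (combination n (n : Int) tmp total dp idx).getD m 0
        = dp.getD m 0 + pvW n (tmp.items.drop idx.toNat) ((m : Int) - total) := by
  intro n
  induction n with
  | zero =>
    intro tmp total dp idx q hnd hvals hidx0 hidxlt htot0 htotq hlen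
    rw [combination]
    rw [if_pos (Or.inl (by norm_num))]
    have hsum0 : 0 ≤ pvSum tmp.items := pvSum_nonneg _ hvals
    have hq0 : 0 ≤ q := by omega
    have htlt : total.toNat < dp.length := by omega
    rw [PySem.List.pySetD_of_nonneg _ _ htot0,
        PySem.List.pyGetD_of_nonneg _ _ htot0]
    constructor
    · simp
    · intro m
      rw [pvGetDSet _ _ _ _ htlt]
      have hW : pvW 0 (tmp.items.drop idx.toNat) ((m : Int) - total) = pvDelta ((m : Int) - total) := by
        simp [pvW]
      rw [hW]
      by_cases hm : m = total.toNat
      · have h1 : (m : Int) - total = 0 := by omega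
        simp [hm, pvDelta, Int.toNat_of_nonneg htot0]
      · have h1 : (m : Int) - total ≠ 0 := by omega
        simp [hm, pvDelta, h1]
  | succ k ih =>
    intro tmp total dp idx q hnd hvals hidx0 hidxlt htot0 htotq hlen
    rw [combination]
    have hcond : ¬ (((k : Int) + 1 = 0) ∨ (tmp.size : Int) ≤ idx) := by
      rintro (h | h) <;> omega
    rw [if_neg (by push_cast; exact hcond)]
    have hcopy : tmp.keys.foldl (fun d i => d.insert i (tmp.getD i 0)) PySem.Dict.empty = tmp := by
      apply PySem.Dict.ext
      rw [PySem.Dict.items_foldl_insert_fresh tmp.keys (fun a => a) (fun a => tmp.getD a 0)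
            PySem.Dict.empty (fun a _ => PySem.Dict.contains_empty a) (by simpa using hnd)]
      rw [← PySem.Dict.items_eq_map_keys tmp hnd 0]
      rfl
    simp only [pvCopyPair, List.nil_append, hcopy]
    have hklen : tmp.keys.length = tmp.items.length := by
      show (tmp.items.map (·.1)).length = _
      simp
    have loop : ∀ (cnt : Nat) (i : Int), 0 ≤ i → i + (cnt : Int) = (tmp.size : Int) →
        ∀ (tmpS : PySem.Dict Int Int) (dpS : List Int),
        tmpS.keys = tmp.keys →
        (∀ p ∈ tmpS.items, 0 ≤ p.1 ∧ 0 ≤ p.2) →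
        total + pvSum tmpS.items ≤ q →
        dpS.length = (q + 1).toNat →
        ((PySem.List.pyRange i (tmp.size : Int) 1).foldl
            (fun st i =>
              if st.1.getD (PySem.List.pyGetD tmp.keys i 0) 0 > 0 then
                (st.1.insert (PySem.List.pyGetD tmp.keys i 0) (st.1.getD (PySem.List.pyGetD tmp.keys i 0) 0 - 1),
                  combination k (((k + 1 : Nat) : Int) - 1)
                    (st.1.insert (PySem.List.pyGetD tmp.keys i 0) (st.1.getD (PySem.List.pyGetD tmp.keys i 0) 0 - 1))
                    (total + PySem.List.pyGetD tmp.keys i 0) st.2 i)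
              else st)
            (tmpS, dpS)).2.length = (q + 1).toNat ∧
        ∀ m : Nat, ((PySem.List.pyRange i (tmp.size : Int) 1).foldl
            (fun st i =>
              if st.1.getD (PySem.List.pyGetD tmp.keys i 0) 0 > 0 then
                (st.1.insert (PySem.List.pyGetD tmp.keys i 0) (st.1.getD (PySem.List.pyGetD tmp.keys i 0) 0 - 1),
                  combination k (((k + 1 : Nat) : Int) - 1)
                    (st.1.insert (PySem.List.pyGetD tmp.keys i 0) (st.1.getD (PySem.List.pyGetD tmp.keys i 0) 0 - 1))
                    (total + PySem.List.pyGetD tmp.keys i 0) st.2 i)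
              else st)
            (tmpS, dpS)).2.getD m 0
          = dpS.getD m 0 + pvW (k + 1) (tmpS.items.drop i.toNat) ((m : Int) - total) := by
      intro cnt
      induction cnt with
      | zero =>
        intro i hi0 hisz tmpS dpS hkeysS hvalsS hsumS hdplen
        rw [PySem.List.pyRange_one_eq_nil (by push_cast at hisz; omega)]
        have hSlen : tmpS.items.length = tmp.items.length := by
          have h1 : tmpS.keys.length = tmp.keys.length := by rw [hkeysS]
          have h2 : tmpS.keys.length = tmpS.items.length := by
            show (tmpS.items.map (·.1)).length = _
            simp
          omega
        have hdropnil : tmpS.items.drop i.toNat = [] := by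
          apply List.drop_eq_nil_of_le
          have : (tmp.size : Int) = (tmp.items.length : Int) := rfl
          omega
        refine ⟨hdplen, fun m => ?_⟩
        rw [hdropnil, pvW_succ_nil]
        simp
      | succ c ihc =>
        intro i hi0 hisz tmpS dpS hkeysS hvalsS hsumS hdplen
        have hsz : (tmp.size : Int) = (tmp.items.length : Int) := rfl
        have hilt : i < (tmp.size : Int) := by push_cast at hisz; omega
        have hnds : tmpS.keys.Nodup := hkeysS ▸ hnd
        have hSlen : tmpS.items.length = tmp.items.length := by
          have h1 : tmpS.keys.length = tmp.keys.length := by rw [hkeysS]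
          have h2 : tmpS.keys.length = tmpS.items.length := by
            show (tmpS.items.map (·.1)).length = _
            simp
          omega
        have hj : i.toNat < tmpS.items.length := by omega
        have hkmap : tmpS.keys = tmpS.items.map (·.1) := rfl
        have hkey : PySem.List.pyGetD tmp.keys i 0 = (tmpS.items[i.toNat]'hj).1 := by
          rw [← hkeysS, PySem.List.pyGetD_eq_getElem _ _ hi0 (by rw [hkmap]; simp; omega)]
          simp [hkmap]
        have hmem : (((tmpS.items[i.toNat]'hj).1, (tmpS.items[i.toNat]'hj).2)) ∈ tmpS.items := by
          have h0 := List.getElem_mem hj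
          simpa using h0
        have hcv : tmpS.getD (tmpS.items[i.toNat]'hj).1 0 = (tmpS.items[i.toNat]'hj).2 :=
          PySem.Dict.getD_of_mem_items tmpS hmem hnds 0
        have hw0 : 0 ≤ (tmpS.items[i.toNat]'hj).1 := (hvalsS _ (List.getElem_mem hj)).1
        have hc0 : 0 ≤ (tmpS.items[i.toNat]'hj).2 := (hvalsS _ (List.getElem_mem hj)).2
        have hi1 : (i + 1).toNat = i.toNat + 1 := by omega
        have hdropcons : tmpS.items.drop i.toNat
            = (tmpS.items[i.toNat]'hj) :: tmpS.items.drop (i.toNat + 1) :=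
          List.drop_eq_getElem_cons hj
        rw [PySem.List.pyRange_one_cons hilt]
        simp only [List.foldl_cons]
        rw [hkey, hcv]
        by_cases hpos : 0 < (tmpS.items[i.toNat]'hj).2
        · rw [if_pos (by exact hpos)]
          -- the decremented dict
          have hcont : tmpS.contains (tmpS.items[i.toNat]'hj).1 = true :=
            (PySem.Dict.contains_iff_mem_keys _ _).mpr
              (by rw [hkmap]; exact List.mem_map_of_mem (List.getElem_mem hj))
          have hins : (tmpS.insert (tmpS.items[i.toNat]'hj).1 ((tmpS.items[i.toNat]'hj).2 - 1)).items
              = tmpS.items.set i.toNat ((tmpS.items[i.toNat]'hj).1, (tmpS.items[i.toNat]'hj).2 - 1) := by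
            rw [PySem.Dict.items_insert_of_contains _ _ hcont]
            exact pvItemsInsertSet tmpS.items i.toNat hj (by rw [← hkmap]; exact hnds) _
          have hkeys' : (tmpS.insert (tmpS.items[i.toNat]'hj).1 ((tmpS.items[i.toNat]'hj).2 - 1)).keys
              = tmp.keys := by rw [PySem.Dict.keys_insert_of_contains _ _ hcont, hkeysS]
          have hvals' : ∀ p ∈ (tmpS.insert (tmpS.items[i.toNat]'hj).1 ((tmpS.items[i.toNat]'hj).2 - 1)).items,
              0 ≤ p.1 ∧ 0 ≤ p.2 := by
            intro p hp
            rw [hins] at hp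
            rcases List.mem_or_eq_of_mem_set hp with hp' | rfl
            · exact hvalsS p hp'
            · exact ⟨hw0, by omega⟩
          have hsum' : pvSum (tmpS.insert (tmpS.items[i.toNat]'hj).1 ((tmpS.items[i.toNat]'hj).2 - 1)).items
              = pvSum tmpS.items - (tmpS.items[i.toNat]'hj).1 := by
            rw [hins, pvSumSet _ _ _ hj]
            ring
          have hrec := ih (tmpS.insert (tmpS.items[i.toNat]'hj).1 ((tmpS.items[i.toNat]'hj).2 - 1))
            (total + (tmpS.items[i.toNat]'hj).1) dpS i q
            (by rw [hkeys']; exact hnd) hvals' hi0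
            (by
              have : (tmpS.insert (tmpS.items[i.toNat]'hj).1 ((tmpS.items[i.toNat]'hj).2 - 1)).items.length
                  = tmpS.items.length := by rw [hins]; simp
              show i < ((tmpS.insert (tmpS.items[i.toNat]'hj).1 ((tmpS.items[i.toNat]'hj).2 - 1)).items.length : Int)
              omega)
            (by omega) (by rw [hsum']; omega) hdplen
          rw [show (k : Int) = ((k + 1 : Nat) : Int) - 1 by push_cast; ring] at hrec
          have hdrop' : (tmpS.insert (tmpS.items[i.toNat]'hj).1 ((tmpS.items[i.toNat]'hj).2 - 1)).items.drop i.toNat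
              = ((tmpS.items[i.toNat]'hj).1, (tmpS.items[i.toNat]'hj).2 - 1) :: tmpS.items.drop (i.toNat + 1) := by
            rw [hins]
            exact pvDropSetCons _ _ _ hj
          have hdrop'' : (tmpS.insert (tmpS.items[i.toNat]'hj).1 ((tmpS.items[i.toNat]'hj).2 - 1)).items.drop (i.toNat + 1)
              = tmpS.items.drop (i.toNat + 1) := by
            rw [hins]
            exact pvDropSet _ _ _
          have hstep := ihc (i + 1) (by omega) (by push_cast at hisz ⊢; omega)
            (tmpS.insert (tmpS.items[i.toNat]'hj).1 ((tmpS.items[i.toNat]'hj).2 - 1))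
            (combination k (((k + 1 : Nat) : Int) - 1)
              (tmpS.insert (tmpS.items[i.toNat]'hj).1 ((tmpS.items[i.toNat]'hj).2 - 1))
              (total + (tmpS.items[i.toNat]'hj).1) dpS i)
            hkeys' hvals' (by rw [hsum']; omega) (by rw [hrec.1]; exact hdplen)
          refine ⟨hstep.1, fun m => ?_⟩
          rw [hstep.2 m, hrec.2 m]
          rw [hi1, hdrop'', hdropcons, pvW_succ_cons, if_pos hpos, hdrop']
          ring
        · rw [if_neg (by exact hpos)]
          have hstep := ihc (i + 1) (by omega) (by push_cast at hisz ⊢; omega) tmpS dpS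
            hkeysS hvalsS hsumS hdplen
          refine ⟨hstep.1, fun m => ?_⟩
          rw [hstep.2 m, hi1, hdropcons, pvW_succ_cons, if_neg hpos]
          ring_nf
    have hfin := loop (((tmp.size : Int) - idx).toNat) idx hidx0 (by omega) tmp dp rfl hvals htotq hlen
    exact ⟨by rw [hfin.1, hlen], hfin.2⟩

lemma bfold_spec (q : Int) : ∀ (rest P : List (Int × Int)) (dp : List Int),
    (∀ p ∈ P, 0 ≤ p.1 ∧ 0 ≤ p.2) → (∀ p ∈ rest, 0 ≤ p.1 ∧ 0 ≤ p.2) →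
    pvSum P + pvSum rest ≤ q →
    dp.length = (q + 1).toNat →
    (∀ m : Nat, m < dp.length → dp.getD m 0 = pvC P (m : Int)) →
    (rest.foldl (fun dp p =>
        (PySem.List.pyRange 0 (q + 1) 1).map (fun t =>
          (PySem.List.pyRange 0 (p.2 + 1) 1).foldl (fun s j =>
            if 0 ≤ t - j * p.1 ∧ t - j * p.1 ≤ q then s + PySem.List.pyGetD dp (t - j * p.1) 0 else s) 0)) dp).length = (q + 1).toNat ∧
    ∀ m : Nat, m < (q + 1).toNat →
      (rest.foldl (fun dp p =>
        (PySem.List.pyRange 0 (q + 1) 1).map (fun t =>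
          (PySem.List.pyRange 0 (p.2 + 1) 1).foldl (fun s j =>
            if 0 ≤ t - j * p.1 ∧ t - j * p.1 ≤ q then s + PySem.List.pyGetD dp (t - j * p.1) 0 else s) 0)) dp).getD m 0
        = pvC (P ++ rest) (m : Int) := by
  intro rest
  induction rest with
  | nil =>
    intro P dp hP hrest hsum hlen hinv
    refine ⟨hlen, fun m hm => ?_⟩
    rw [List.append_nil]
    exact hinv m (by omega)
  | cons p rest' ih =>
    intro P dp hP hrest hsum hlen hinv
    obtain ⟨w, c⟩ := p
    have hPp : ∀ x ∈ P ++ [(w, c)], 0 ≤ x.1 ∧ 0 ≤ x.2 := by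
      intro x hx
      rcases List.mem_append.mp hx with hx' | hx'
      · exact hP x hx'
      · rcases List.mem_singleton.mp hx' with rfl
        exact hrest _ (by simp)
    have hrest' : ∀ x ∈ rest', 0 ≤ x.1 ∧ 0 ≤ x.2 := fun x hx => hrest x (by simp [hx])
    have hw0 : 0 ≤ w := (hrest (w, c) (by simp)).1
    have hc0 : 0 ≤ c := (hrest (w, c) (by simp)).2
    have hsumP : 0 ≤ pvSum P := pvSum_nonneg _ hP
    have hsumR : 0 ≤ pvSum rest' := pvSum_nonneg _ hrest'
    have hsumcons : pvSum ((w, c) :: rest') = w * c + pvSum rest' := by simp [pvSum]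
    have hwc0 : 0 ≤ w * c := mul_nonneg hw0 hc0
    have hq0 : 0 ≤ q := by omega
    have happ1 : pvSum (P ++ [(w, c)]) = pvSum P + w * c := by
      rw [pvSum_append]; simp [pvSum]
    have hsum' : pvSum (P ++ [(w, c)]) + pvSum rest' ≤ q := by
      rw [happ1]; omega
    simp only [List.foldl_cons]
    have hnew : ∀ m : Nat, m < (q + 1).toNat →
        ((PySem.List.pyRange 0 (q + 1) 1).map (fun t =>
          (PySem.List.pyRange 0 (c + 1) 1).foldl (fun s j =>
            if 0 ≤ t - j * w ∧ t - j * w ≤ q then s + PySem.List.pyGetD dp (t - j * w) 0 else s) 0)).getD m 0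
        = pvC (P ++ [(w, c)]) (m : Int) := by
      intro m hm
      rw [List.getD_eq_getElem?_getD]
      rw [show (q + 1 : Int) = (((q + 1).toNat : Nat) : Int) by omega]
      rw [PySem.List.getElem?_map_pyRange_zero _ _ _ hm]
      simp only [Option.getD_some]
      have hbody : ∀ (s j : Int),
          (if 0 ≤ (m : Int) - j * w ∧ (m : Int) - j * w ≤ q then s + PySem.List.pyGetD dp ((m : Int) - j * w) 0 else s)
          = s + (if 0 ≤ (m : Int) - j * w ∧ (m : Int) - j * w ≤ q then PySem.List.pyGetD dp ((m : Int) - j * w) 0 else 0) := by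
        intro s j
        split
        · rfl
        · ring
      simp only [hbody]
      rw [PySem.List.foldl_add]
      rw [PySem.List.pyRange_one]
      rw [List.map_map]
      have hterm : ∀ k ∈ List.range ((c + 1 - 0).toNat),
          ((fun j => if 0 ≤ (m : Int) - j * w ∧ (m : Int) - j * w ≤ q then PySem.List.pyGetD dp ((m : Int) - j * w) 0 else 0) ∘ (fun k : Nat => (0 : Int) + (k : Int))) k
          = pvC P ((m : Int) - (k : Int) * w) := by
        intro k _
        simp only [Function.comp, zero_add]
        by_cases hcnd : 0 ≤ (m : Int) - (k : Int) * w ∧ (m : Int) - (k : Int) * w ≤ q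
        · rw [if_pos hcnd]
          rw [PySem.List.pyGetD_of_nonneg _ _ hcnd.1]
          have hlt : ((m : Int) - (k : Int) * w).toNat < dp.length := by omega
          rw [hinv _ hlt]
          congr 1
          omega
        · rw [if_neg hcnd]
          symm
          apply pvC_out _ _ hP
          rcases not_and_or.mp hcnd with h1 | h1
          · left; omega
          · right; omega
      rw [List.map_congr_left hterm]
      rw [pvC_append_singleton]
      show _ = pvStep w c (pvC P) (m : Int)
      unfold pvStep
      rw [show ((c + 1 - 0 : Int)).toNat = c.toNat + 1 by omega]
      simp
    have hlennew : ((PySem.List.pyRange 0 (q + 1) 1).map (fun t =>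
          (PySem.List.pyRange 0 (c + 1) 1).foldl (fun s j =>
            if 0 ≤ t - j * w ∧ t - j * w ≤ q then s + PySem.List.pyGetD dp (t - j * w) 0 else s) 0)).length
        = (q + 1).toNat := by
      simp [PySem.List.length_pyRange_one]
    have := ih (P ++ [(w, c)]) _ hPp hrest' hsum' hlennew (by
      intro m hm
      rw [hlennew] at hm
      exact hnew m hm)
    rw [List.append_cons P (w, c) rest'] at *
    exact this

lemma pv_final_eq : ∀ (object : Int) (tmpMap : List (Int × Int)) (totalCnt : Int),
    (0 ≤ object ∧ ∀ p ∈ tmpMap, 0 ≤ p.1 ∧ 0 ≤ p.2) →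
    dynamicP1 object tmpMap totalCnt = dynamicP1_alt object tmpMap totalCnt := by
  intro object tmpMap totalCnt hpre
  obtain ⟨hobj, hpairs⟩ := hpre
  simp only [dynamicP1, dynamicP1_alt]
  -- shared dict
  have hnd : ((PySem.Dict.ofList tmpMap).insert object 1).keys.Nodup :=
    PySem.Dict.nodup_keys_insert _ _ _ (PySem.Dict.nodup_keys_ofList tmpMap)
  have hvals : ∀ p ∈ ((PySem.Dict.ofList tmpMap).insert object 1).items, 0 ≤ p.1 ∧ 0 ≤ p.2 := by
    intro p hp
    rcases (PySem.Dict.mem_items_insert _ _ _ _).mp hp with h1 | h1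
    · rw [h1]; exact ⟨hobj, by norm_num⟩
    · rcases pvMemFoldInsert tmpMap PySem.Dict.empty p h1.1 with h2 | h2
      · exact hpairs p h2
      · rw [show (PySem.Dict.empty : PySem.Dict Int Int).items = [] from rfl] at h2
        simp at h2
  have hkeymem : object ∈ ((PySem.Dict.ofList tmpMap).insert object 1).keys :=
    (PySem.Dict.mem_keys_insert _ _ _ _).mpr (Or.inl rfl)
  have hlenpos : 0 < ((PySem.Dict.ofList tmpMap).insert object 1).items.length := by
    have h1 : ((PySem.Dict.ofList tmpMap).insert object 1).keys ≠ [] := List.ne_nil_of_mem hkeymem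
    have h2 : ((PySem.Dict.ofList tmpMap).insert object 1).keys
        = ((PySem.Dict.ofList tmpMap).insert object 1).items.map (·.1) := rfl
    rcases Nat.eq_zero_or_pos (((PySem.Dict.ofList tmpMap).insert object 1).items.length) with h3 | h3
    · exfalso; apply h1; rw [h2]; rw [List.eq_nil_iff_length_eq_zero] ; simp [h3]
    · exact h3
  have hitems := PySem.Dict.items_eq_map_keys ((PySem.Dict.ofList tmpMap).insert object 1) hnd 0
  -- the three scalar folds
  have hq : ((PySem.Dict.ofList tmpMap).insert object 1).keys.foldl
      (fun a i => a + i * ((PySem.Dict.ofList tmpMap).insert object 1).getD i 0) 0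
      = pvSum ((PySem.Dict.ofList tmpMap).insert object 1).items := by
    rw [PySem.List.foldl_add]
    rw [pvSum, hitems, List.map_map]
    simp [Function.comp_def]
  have hn : ((PySem.Dict.ofList tmpMap).insert object 1).keys.foldl
      (fun a i => a + ((PySem.Dict.ofList tmpMap).insert object 1).getD i 0) 0
      = pvCnt ((PySem.Dict.ofList tmpMap).insert object 1).items := by
    rw [PySem.List.foldl_add]
    rw [pvCnt, hitems, List.map_map]
    simp [Function.comp_def]
  have hqB : ((PySem.Dict.ofList tmpMap).insert object 1).items.foldl
      (fun a p => a + p.1 * p.2) 0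
      = pvSum ((PySem.Dict.ofList tmpMap).insert object 1).items := by
    rw [PySem.List.foldl_add]
    simp [pvSum]
  rw [hq, hn, hqB]
  rw [PySem.List.pySetD_of_nonneg _ 1 (by norm_num : (0:Int) ≤ 0)]
  have hS0 : 0 ≤ pvSum ((PySem.Dict.ofList tmpMap).insert object 1).items := pvSum_nonneg _ hvals
  have hC0 : 0 ≤ pvCnt ((PySem.Dict.ofList tmpMap).insert object 1).items :=
    pvCnt_nonneg _ (fun p hp => (hvals p hp).2)
  have hdp0len : ((List.replicate (pvSum ((PySem.Dict.ofList tmpMap).insert object 1).items + 1).toNat (0:Int)).set (0:Int).toNat 1).length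
      = (pvSum ((PySem.Dict.ofList tmpMap).insert object 1).items + 1).toNat := by simp
  have hdp0get : ∀ m : Nat, ((List.replicate (pvSum ((PySem.Dict.ofList tmpMap).insert object 1).items + 1).toNat (0:Int)).set (0:Int).toNat 1).getD m 0
      = pvDelta (m : Int) := by
    intro m
    rw [show ((0:Int).toNat) = 0 from rfl]
    rw [pvGetDSet _ _ _ _ (by simp; omega)]
    by_cases hm : m = 0
    · simp [hm, pvDelta]
    · have h1 : ¬ ((m : Int) = 0) := by omega
      simp only [if_neg hm, pvDelta, if_neg h1]
      rcases lt_or_ge m ((pvSum ((PySem.Dict.ofList tmpMap).insert object 1).items + 1).toNat) with h2 | h2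
      · rw [List.getD_eq_getElem _ _ (by simpa using h2)]
        simp
      · rw [List.getD_eq_default _ _ (by simpa using h2)]
  -- A-side fold over the cnt range
  have afold : ∀ (lst : List Int), (∀ x ∈ lst, 1 ≤ x) → ∀ dp : List Int,
      dp.length = (pvSum ((PySem.Dict.ofList tmpMap).insert object 1).items + 1).toNat →
      ((lst.foldl (fun dp cnt => combination cnt.toNat cnt ((PySem.Dict.ofList tmpMap).insert object 1) 0 dp 0) dp).length
          = (pvSum ((PySem.Dict.ofList tmpMap).insert object 1).items + 1).toNat ∧
       ∀ m : Nat, (lst.foldl (fun dp cnt => combination cnt.toNat cnt ((PySem.Dict.ofList tmpMap).insert object 1) 0 dp 0) dp).getD m 0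
          = dp.getD m 0 + (lst.map (fun cnt => pvW cnt.toNat ((PySem.Dict.ofList tmpMap).insert object 1).items (m : Int))).sum) := by
    intro lst
    induction lst with
    | nil =>
      intro _ dp hdl
      refine ⟨hdl, fun m => by simp⟩
    | cons x lst' ih =>
      intro hx1 dp hdl
      obtain ⟨nn, rfl⟩ : ∃ nn : Nat, x = (nn : Int) :=
        ⟨x.toNat, (Int.toNat_of_nonneg (by have := hx1 x (by simp); omega)).symm⟩
      simp only [List.foldl_cons, Int.toNat_natCast]
      have hcs := combination_spec nn ((PySem.Dict.ofList tmpMap).insert object 1) 0 dp 0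
        (pvSum ((PySem.Dict.ofList tmpMap).insert object 1).items)
        hnd hvals (le_refl 0) (by exact_mod_cast hlenpos) (le_refl 0) (by omega) hdl
      have hstep := ih (fun y hy => hx1 y (by simp [hy])) _ (by rw [hcs.1]; exact hdl)
      refine ⟨hstep.1, fun m => ?_⟩
      rw [hstep.2 m, hcs.2 m]
      simp only [List.map_cons, List.sum_cons, Int.toNat_zero, List.drop_zero, Int.toNat_natCast]
      ring
  have hmemrange : ∀ x ∈ PySem.List.pyRange 1 (pvCnt ((PySem.Dict.ofList tmpMap).insert object 1).items + 1) 1, 1 ≤ x := by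
    intro x hx
    exact ((PySem.List.mem_pyRange_one).mp hx).1
  have hAfold := afold _ hmemrange _ hdp0len
  -- rewrite the range sum into pvC
  have hA : ∀ m : Nat,
      ((PySem.List.pyRange 1 (pvCnt ((PySem.Dict.ofList tmpMap).insert object 1).items + 1) 1).foldl
        (fun dp cnt => combination cnt.toNat cnt ((PySem.Dict.ofList tmpMap).insert object 1) 0 dp 0)
        ((List.replicate (pvSum ((PySem.Dict.ofList tmpMap).insert object 1).items + 1).toNat (0:Int)).set (0:Int).toNat 1)).getD m 0
      = pvC ((PySem.Dict.ofList tmpMap).insert object 1).items (m : Int) := by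
    intro m
    rw [hAfold.2 m, hdp0get m]
    rw [PySem.List.pyRange_one, List.map_map]
    have hcongr : ∀ k ∈ List.range ((pvCnt ((PySem.Dict.ofList tmpMap).insert object 1).items + 1 - 1).toNat),
        ((fun cnt => pvW cnt.toNat ((PySem.Dict.ofList tmpMap).insert object 1).items (m : Int)) ∘ (fun k : Nat => (1:Int) + (k:Int))) k
        = pvW (k + 1) ((PySem.Dict.ofList tmpMap).insert object 1).items (m : Int) := by
      intro k _
      simp only [Function.comp]
      congr 1
      omega
    rw [List.map_congr_left hcongr]
    have hNN : ((pvCnt ((PySem.Dict.ofList tmpMap).insert object 1).items + 1 - 1).toNat)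
        = (pvCnt ((PySem.Dict.ofList tmpMap).insert object 1).items).toNat := by omega
    rw [hNN]
    have hsum := sum_map_range_succ (pvCnt ((PySem.Dict.ofList tmpMap).insert object 1).items).toNat
      (fun n => pvW n ((PySem.Dict.ofList tmpMap).insert object 1).items (m : Int))
    rw [pvW_zero_eq] at hsum
    rw [← hsum]
    apply pvRangeSum (((PySem.Dict.ofList tmpMap).insert object 1).items.length
        + (pvCnt ((PySem.Dict.ofList tmpMap).insert object 1).items).toNat) _ _ _ (le_refl _)
      (fun p hp => (hvals p hp).2)
    push_cast
    omega
  -- B side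
  have hB := bfold_spec (pvSum ((PySem.Dict.ofList tmpMap).insert object 1).items)
    ((PySem.Dict.ofList tmpMap).insert object 1).items []
    ((List.replicate (pvSum ((PySem.Dict.ofList tmpMap).insert object 1).items + 1).toNat (0:Int)).set (0:Int).toNat 1)
    (by intro p hp; simp at hp) hvals
    (by rw [show pvSum [] = 0 from rfl]; omega) hdp0len
    (by
      intro m _
      rw [hdp0get m]
      rfl)
  -- lists are equal
  have hext : ((PySem.List.pyRange 1 (pvCnt ((PySem.Dict.ofList tmpMap).insert object 1).items + 1) 1).foldl
        (fun dp cnt => combination cnt.toNat cnt ((PySem.Dict.ofList tmpMap).insert object 1) 0 dp 0)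
        ((List.replicate (pvSum ((PySem.Dict.ofList tmpMap).insert object 1).items + 1).toNat (0:Int)).set (0:Int).toNat 1))
      = (((PySem.Dict.ofList tmpMap).insert object 1).items.foldl (fun dp p =>
        (PySem.List.pyRange 0 (pvSum ((PySem.Dict.ofList tmpMap).insert object 1).items + 1) 1).map (fun t =>
          (PySem.List.pyRange 0 (p.2 + 1) 1).foldl (fun s j =>
            if 0 ≤ t - j * p.1 ∧ t - j * p.1 ≤ pvSum ((PySem.Dict.ofList tmpMap).insert object 1).items
            then s + PySem.List.pyGetD dp (t - j * p.1) 0 else s) 0))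
        ((List.replicate (pvSum ((PySem.Dict.ofList tmpMap).insert object 1).items + 1).toNat (0:Int)).set (0:Int).toNat 1)) := by
    apply List.ext_getElem
    · rw [hAfold.1, hB.1]
    · intro i h1 h2
      have hi : i < (pvSum ((PySem.Dict.ofList tmpMap).insert object 1).items + 1).toNat := by
        rw [← hAfold.1]; exact h1
      rw [← List.getD_eq_getElem _ 0 h1, ← List.getD_eq_getElem _ 0 h2]
      rw [hA i, hB.2 i hi, List.nil_append]
  rw [hext]


-- ===== VERDICT (by name: the statement is the Claim_ definition above) =====
theorem dynamicP1_spec : Claim_equal_dynamicP1 := by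
  intro object tmpMap totalCnt _ hpre
  exact pv_final_eq object tmpMap totalCnt hpre
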